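-- pv_equiv track=rewrite | github.com/LochlanTresize/classifier-app | classify.py | score_document
-- ===== SOURCE A (Python) =====
-- from collections import defaultdict as dd
--
-- def count_trigrams(document):
--     '''
--     count_trigrams takes a string and returns a dictionary of the counts
--     of trigrams within the document (the language vector)
--     the input 'document' is a string
--     '''
--
--     language_vector = dd(int)
--
--     if len(document) < 3:
--         return language_vector
--
--     for i in range(len(document) - 2):
--         language_vector[document[i] + document[i+1] + document[i+2]] += 1
--
--     return language_vector
--
-- def score_document(document_to_classify, language_vectors):
--     '''
--     takes in a document to classify (string) and the dictionary of language vectors and returns the scores for each language in language vectors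
--     '''
--
--
--     document_to_classify_trigrams = count_trigrams(document_to_classify)
--     languages_scores = dd(int)
--
--     for vector in language_vectors:
--         current_language_vector = language_vectors[vector]
--
--         for trigram in document_to_classify_trigrams:
--             if trigram in current_language_vector:
--                 new_score = document_to_classify_trigrams[trigram] * current_language_vector[trigram]
--                 languages_scores[vector] += new_score
--
--
--     return languages_scores
-- ===== SOURCE B (Python) =====
-- from collections import defaultdict as dd
--
-- def score_document(document_to_classify, language_vectors):
--     trigrams = [document_to_classify[i:i + 3]
--                 for i in range(len(document_to_classify) - 2)]
--     scores = dd(int)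
--     for language, vector in language_vectors.items():
--         hits = [vector[t] for t in trigrams if t in vector]
--         if hits:
--             scores[language] = sum(hits)
--     return scores
-- ===== Notes on version B (the rewrite author's own statement) =====
-- stated objective: simpler
-- what changed: B drops the count_trigrams frequency table entirely: it builds the plain list of trigram occurrences by slicing, and for each language collects the vector values of the matching occurrences in one comprehension, assigning the sum once per language instead of accumulating count*value increments over a Counter dict.
import Mathlib
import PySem

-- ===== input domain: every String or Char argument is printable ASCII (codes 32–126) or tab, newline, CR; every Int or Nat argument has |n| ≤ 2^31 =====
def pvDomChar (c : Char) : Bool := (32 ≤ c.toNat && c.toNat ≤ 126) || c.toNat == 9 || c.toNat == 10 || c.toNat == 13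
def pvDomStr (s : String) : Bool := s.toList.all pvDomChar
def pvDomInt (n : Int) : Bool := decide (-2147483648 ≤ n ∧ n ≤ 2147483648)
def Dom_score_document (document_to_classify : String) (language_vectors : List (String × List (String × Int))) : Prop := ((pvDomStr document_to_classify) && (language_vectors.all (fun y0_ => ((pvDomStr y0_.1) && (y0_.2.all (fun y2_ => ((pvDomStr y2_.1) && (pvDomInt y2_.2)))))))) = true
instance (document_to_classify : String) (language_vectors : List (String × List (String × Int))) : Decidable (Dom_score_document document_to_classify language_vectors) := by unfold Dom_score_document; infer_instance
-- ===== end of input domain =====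

-- B drops the separate trigram-frequency table: it lists the trigram occurrences by slicing and,
-- per language, sums the vector values of the matching occurrences in one comprehension (objective: simpler).


-- ===== PORT A =====
-- trigram strings are handled as their character lists (exact: String ↔ List Char is bijective,
-- and Python's ==/`in` on strings agrees with BEq on the char lists)
def pvCountTrigrams (document : List Char) : PySem.Dict (List Char) Int :=
  if document.length < 3 then PySem.Dict.empty
  else
    (PySem.List.pyRange 0 ((document.length : Int) - 2) 1).foldl
      (fun d i =>
        match PySem.List.pyGet? document i, PySem.List.pyGet? document (i + 1),
              PySem.List.pyGet? document (i + 2) with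
        | some a, some b, some c => d.modify [a, b, c] 0 (· + 1)
        | _, _, _ => d)  -- guard only: every i of the range is in bounds
      PySem.Dict.empty

def score_document (document_to_classify : String) (language_vectors : List (String × List (String × Int))) : List (String × Int) :=
  let tg := pvCountTrigrams document_to_classify.toList
  ((PySem.Dict.ofList language_vectors).items.foldl
    (fun (d : PySem.Dict String Int) lv =>
      let cv : PySem.Dict (List Char) Int :=
        PySem.Dict.ofList (lv.2.map (fun p => (p.1.toList, p.2)))
      tg.items.foldl
        (fun d p =>
          if cv.contains p.1 then d.modify lv.1 0 (· + p.2 * cv.getD p.1 0) else d)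
        d)
    PySem.Dict.empty).items

-- ===== PORT B =====
def score_document_alt (document_to_classify : String) (language_vectors : List (String × List (String × Int))) : List (String × Int) :=
  let doc := document_to_classify.toList
  let trigrams := (PySem.List.pyRange 0 ((doc.length : Int) - 2) 1).map
      (fun i => PySem.List.slice doc (some i) (some (i + 3)))
  ((PySem.Dict.ofList language_vectors).items.foldl
    (fun (d : PySem.Dict String Int) lv =>
      let cv : PySem.Dict (List Char) Int :=
        PySem.Dict.ofList (lv.2.map (fun p => (p.1.toList, p.2)))
      let hits := (trigrams.filter (fun t => cv.contains t)).map (fun t => cv.getD t 0)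
      if hits.isEmpty then d else d.insert lv.1 hits.sum)
    PySem.Dict.empty).items

-- ===== PRECONDITION & SPEC =====
def Spec_score_document (document_to_classify : String) (language_vectors : List (String × List (String × Int))) (out : List (String × Int)) : Prop := out = score_document_alt document_to_classify language_vectors
instance (document_to_classify : String) (language_vectors : List (String × List (String × Int))) (out : List (String × Int)) : Decidable (Spec_score_document document_to_classify language_vectors out) := by unfold Spec_score_document; infer_instance

-- ===== CLAIM (what is proved, stated in full; the proofs are below) =====
def Claim_equal_score_document : Prop := ∀ (document_to_classify : String) (language_vectors : List (String × List (String × Int))), Dom_score_document document_to_classify language_vectors → Spec_score_document document_to_classify language_vectors (score_document document_to_classify language_vectors)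

-- ===== LEMMAS AND PROOFS =====

-- the list of trigram occurrences of a document, in order
def pvTris : List Char → List (List Char)
  | a :: b :: c :: r => [a, b, c] :: pvTris (b :: c :: r)
  | _ => []

theorem pv_map_take3 (l : List Char) :
    (List.range (l.length - 2)).map (fun k => (l.drop k).take 3) = pvTris l := by
  induction l with
  | nil => simp [pvTris]
  | cons a t ih =>
    match t with
    | [] => simp [pvTris]
    | [b] => simp [pvTris]
    | b :: c :: r =>
      have hlen : (a :: b :: c :: r).length - 2 = (b :: c :: r).length - 2 + 1 := by
        simp
      rw [hlen, List.range_succ_eq_map, List.map_cons, List.map_map]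
      show _ :: _ = pvTris (a :: b :: c :: r)
      rw [show pvTris (a :: b :: c :: r) = [a, b, c] :: pvTris (b :: c :: r) from rfl, ← ih]
      congr 1

theorem pv_slices_eq_tris (l : List Char) :
    (PySem.List.pyRange 0 ((l.length : Int) - 2) 1).map
      (fun i => PySem.List.slice l (some i) (some (i + 3))) = pvTris l := by
  rw [PySem.List.pyRange_one, List.map_map]
  have hT : (((l.length : Int) - 2 - 0)).toNat = l.length - 2 := by omega
  rw [hT, ← pv_map_take3]
  apply List.map_congr_left
  intro k hk
  simp only [Function.comp_apply, zero_add]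
  rw [PySem.List.slice_toNat l (by positivity) (by positivity)]
  have h2 : ((k : Int)).toNat = k := by omega
  rw [h2, show ((k : Int) + 3).toNat - k = 3 by omega]

theorem pv_match_step (l : List Char) (k : Nat) (hk : k + 3 ≤ l.length)
    (d : PySem.Dict (List Char) Int) :
    (match PySem.List.pyGet? l (0 + (k : Int)), PySem.List.pyGet? l (0 + (k : Int) + 1),
           PySem.List.pyGet? l (0 + (k : Int) + 2) with
     | some a, some b, some c => d.modify [a, b, c] 0 (· + 1)
     | _, _, _ => d) = d.modify ((l.drop k).take 3) 0 (· + 1) := by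
  have hlen : 3 ≤ (l.drop k).length := by simp [List.length_drop]; omega
  rcases e : l.drop k with _ | ⟨a, _ | ⟨b, _ | ⟨c, r⟩⟩⟩ <;> rw [e] at hlen <;> simp at hlen
  have e0 : l[k]? = some a := by
    rw [show k = k + 0 by omega, ← List.getElem?_drop, e]; rfl
  have e1 : l[k+1]? = some b := by
    rw [← List.getElem?_drop, e]; rfl
  have e2 : l[k+2]? = some c := by
    rw [← List.getElem?_drop, e]; rfl
  have c0 : (0 + (k : Int)) = ((k : Nat) : Int) := by omega
  have c1 : (0 + (k : Int) + 1) = (((k + 1) : Nat) : Int) := by push_cast; omega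
  have c2 : (0 + (k : Int) + 2) = (((k + 2) : Nat) : Int) := by push_cast; omega
  rw [c2, c1, c0, PySem.List.pyGet?_natCast, PySem.List.pyGet?_natCast, PySem.List.pyGet?_natCast,
    e0, e1, e2]
  rfl

theorem pv_count_eq_counter (l : List Char) :
    pvCountTrigrams l = PySem.Dict.counter (pvTris l) := by
  by_cases h3 : l.length < 3
  · have ht : pvTris l = [] := by
      match l with
      | [] => rfl
      | [a] => rfl
      | [a, b] => rfl
      | a :: b :: c :: r => simp at h3; omega
    rw [pvCountTrigrams, if_pos h3, ht]
    rfl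
  · rw [pvCountTrigrams, if_neg h3, PySem.List.pyRange_one]
    have hT : (((l.length : Int) - 2 - 0)).toNat = l.length - 2 := by omega
    rw [hT, List.foldl_map, PySem.Dict.counter_eq_foldl, ← pv_map_take3, List.foldl_map]
    apply PySem.List.foldl_congr_mem
    intro d k hkmem
    have hk : k + 3 ≤ l.length := by
      have := List.mem_range.mp hkmem; omega
    exact pv_match_step l k hk d

-- List.count agrees for any two lawful BEq instances (instance bridge used by pv_sum)
theorem pv_count_irrel {α : Type} (i1 i2 : BEq α) (h1 : @LawfulBEq α i1) (h2 : @LawfulBEq α i2)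
    (m : α) (l : List α) : @List.count α i1 m l = @List.count α i2 m l := by
  induction l with
  | nil => rfl
  | cons a l ih =>
    rw [@List.count_cons α i1, @List.count_cons α i2, ih]
    by_cases hx : a = m
    · simp [hx]
    · simp [@beq_iff_eq α i1 h1, @beq_iff_eq α i2 h2, hx]

-- dot product over the distinct trigrams with counts = plain sum over the occurrences
theorem pv_sum (ts : List (List Char)) (P : List Char → Bool) (v : List Char → Int) :
    (((PySem.Set.ofList ts).filter P).map (fun t => (ts.count t : Int) * v t)).sum
      = ((ts.filter P).map v).sum := by
  have key : ∀ (l : List (List Char)) (f : List Char → Int),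
      (l.map f).sum = ∑ m ∈ l.toFinset, (Multiset.count m (l : Multiset (List Char))) • f m := by
    intro l f
    have h1 : ((l : Multiset (List Char)).map f).sum = (l.map f).sum := by simp
    rw [← h1, Finset.sum_multiset_map_count]
    rfl
  rw [key, key]
  have hset : ((PySem.Set.ofList ts).filter P).toFinset = (ts.filter P).toFinset := by
    ext m; simp [PySem.Set.mem_ofList]
  rw [hset]
  apply Finset.sum_congr rfl
  intro m hm
  simp only [List.mem_toFinset, List.mem_filter] at hm
  have h1 : Multiset.count m (((PySem.Set.ofList ts).filter P : List (List Char)) : Multiset (List Char)) = 1 :=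
    Multiset.count_eq_one_of_mem (Multiset.coe_nodup.mpr ((PySem.Set.nodup_ofList ts).filter P))
      (by simp [PySem.Set.mem_ofList, hm.1, hm.2])
  have h2 : Multiset.count m (((ts.filter P : List (List Char))) : Multiset (List Char)) = ts.count m := by
    rw [Multiset.coe_count, pv_count_irrel _ List.instBEq (by infer_instance) (by infer_instance),
      List.count_filter hm.2]
  rw [h1, h2]
  simp

theorem pv_filter_empty_iff (ts : List (List Char)) (P : List Char → Bool) :
    ((PySem.Set.ofList ts).filter P).isEmpty = (ts.filter P).isEmpty := by
  rw [Bool.eq_iff_iff]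
  simp only [List.isEmpty_iff, List.filter_eq_nil_iff]
  constructor <;> intro h x hx hP
  · exact h x ((PySem.Set.mem_ofList ts x).mpr hx) hP
  · exact h x ((PySem.Set.mem_ofList ts x).mp hx) hP

theorem pv_fold_modify_present (xs : List (List Char)) (g : List Char → Int) (k : String)
    (d : PySem.Dict String Int) (a : Int) :
    xs.foldl (fun d t => d.modify k 0 (· + g t)) (d.insert k a)
      = d.insert k (a + (xs.map g).sum) := by
  induction xs generalizing a with
  | nil => simp
  | cons x xs ih =>
    rw [List.foldl_cons]
    have hstep : (d.insert k a).modify k 0 (· + g x) = d.insert k (a + g x) := by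
      rw [PySem.Dict.modify, PySem.Dict.getD_insert_self, PySem.Dict.insert_insert_self]
    rw [hstep, ih]
    simp [add_assoc]

-- one language: A's accumulation over the trigram Counter = B's single assignment of the sum
theorem pv_lang (ts : List (List Char)) (cv : PySem.Dict (List Char) Int) (k : String)
    (d : PySem.Dict String Int) (hk : d.contains k = false) :
    (PySem.Dict.counter ts).items.foldl
        (fun d p => if cv.contains p.1 then d.modify k 0 (· + p.2 * cv.getD p.1 0) else d) d
      = (if ((ts.filter (fun t => cv.contains t)).map (fun t => cv.getD t 0)).isEmpty then d
         else d.insert k ((ts.filter (fun t => cv.contains t)).map (fun t => cv.getD t 0)).sum) := by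
  rw [PySem.Dict.items_counter, List.foldl_map]
  simp only
  rw [PySem.List.foldl_if_eq_foldl_filter (p := fun t => cv.contains t)]
  have hempty := pv_filter_empty_iff ts (fun t => cv.contains t)
  have hsum := pv_sum ts (fun t => cv.contains t) (fun t => cv.getD t 0)
  cases hw : (PySem.Set.ofList ts).filter (fun t => cv.contains t) with
  | nil =>
    rw [hw] at hempty
    simp at hempty
    have hnil : ts.filter (fun t => cv.contains t) = [] := by
      rw [List.filter_eq_nil_iff]
      intro a ha
      simp [hempty a ha]
    simp [hnil]
  | cons x xs =>
    rw [hw] at hempty hsum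
    have hne : ((ts.filter (fun t => cv.contains t)).map (fun t => cv.getD t 0)).isEmpty = false := by
      simp at hempty ⊢
      exact hempty
    rw [hne]
    simp only [List.foldl_cons]
    have hstep : d.modify k 0 (· + (ts.count x : Int) * cv.getD x 0)
        = d.insert k ((ts.count x : Int) * cv.getD x 0) := by
      rw [PySem.Dict.modify, PySem.Dict.getD_of_not_contains d 0 hk, zero_add]
    rw [hstep, pv_fold_modify_present, ← hsum]
    simp

-- the whole language loop, by induction with the freshness invariant on the score keys
theorem pv_outer (ts : List (List Char)) (items : List (String × List (String × Int)))
    (d : PySem.Dict String Int)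
    (hnd : (items.map Prod.fst).Nodup) (hd : ∀ p ∈ items, d.contains p.1 = false) :
    items.foldl
      (fun d lv =>
        let cv : PySem.Dict (List Char) Int :=
          PySem.Dict.ofList (lv.2.map (fun p => (p.1.toList, p.2)))
        (PySem.Dict.counter ts).items.foldl
          (fun d p => if cv.contains p.1 then d.modify lv.1 0 (· + p.2 * cv.getD p.1 0) else d) d) d
    = items.foldl
      (fun d lv =>
        let cv : PySem.Dict (List Char) Int :=
          PySem.Dict.ofList (lv.2.map (fun p => (p.1.toList, p.2)))
        let hits := (ts.filter (fun t => cv.contains t)).map (fun t => cv.getD t 0)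
        if hits.isEmpty then d else d.insert lv.1 hits.sum) d := by
  induction items generalizing d with
  | nil => rfl
  | cons lv rest ih =>
    simp only [List.foldl_cons]
    rw [pv_lang ts (PySem.Dict.ofList (lv.2.map (fun p => (p.1.toList, p.2)))) lv.1 d
      (hd lv (List.mem_cons_self))]
    have hnd' : (lv.1 ∉ rest.map Prod.fst) ∧ (rest.map Prod.fst).Nodup := by
      rw [List.map_cons, List.nodup_cons] at hnd; exact hnd
    apply ih
    · exact hnd'.2
    · intro p hp
      have hne : p.1 ≠ lv.1 := by
        intro h
        exact hnd'.1 (h ▸ List.mem_map_of_mem hp)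
      by_cases hcase : ((ts.filter (fun t => (PySem.Dict.ofList (lv.2.map (fun p => (p.1.toList, p.2)))).contains t)).map
          (fun t => (PySem.Dict.ofList (lv.2.map (fun p => (p.1.toList, p.2)))).getD t 0)).isEmpty
      · simp [hcase, hd p (List.mem_cons_of_mem _ hp)]
      · simp only [hcase, if_neg, Bool.not_eq_true] at *
        simp [PySem.Dict.contains_insert, hne, hd p (List.mem_cons_of_mem _ hp)]

-- ===== VERDICT (by name: the statement is the Claim_ definition above) =====
theorem score_document_spec : Claim_equal_score_document := by
  intro document_to_classify language_vectors _
  unfold Spec_score_document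
  simp only [score_document, score_document_alt]
  rw [pv_count_eq_counter, pv_slices_eq_tris]
  exact congrArg PySem.Dict.items
    (pv_outer (pvTris document_to_classify.toList)
      (PySem.Dict.ofList language_vectors).items PySem.Dict.empty
      (PySem.Dict.nodup_keys_ofList language_vectors)
      (fun p _ => PySem.Dict.contains_empty p.1))
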